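-- pv_equiv track=rewrite | github.com/whisperLiang/Plank-road | edge/transmit.py | _manifest_payload_summary
-- ===== SOURCE A (Python) =====
-- def _manifest_payload_summary(manifest: dict) -> dict[str, int]:
--     samples = list(manifest.get("samples") or [])
--     return {
--         "samples": len(samples),
--         "drift_window_samples": sum(1 for sample in samples if bool(sample.get("in_drift_window", False))),
--         "feature_bytes": sum(int(sample.get("feature_bytes", 0) or 0) for sample in samples),
--         "raw_bytes": sum(int(sample.get("raw_bytes", 0) or 0) for sample in samples),
--     }
-- ===== SOURCE B (Python) =====
-- def _manifest_payload_summary(manifest: dict) -> dict[str, int]: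
--     def stats(sample):
--         return (
--             1,
--             1 if bool(sample.get("in_drift_window", False)) else 0,
--             int(sample.get("feature_bytes", 0) or 0),
--             int(sample.get("raw_bytes", 0) or 0),
--         )
--     vecs = [stats(sample) for sample in list(manifest.get("samples") or [])]
--     n, drift, feature, raw = map(sum, zip(*vecs)) if vecs else (0, 0, 0, 0)
--     return {
--         "samples": n,
--         "drift_window_samples": drift,
--         "feature_bytes": feature,
--         "raw_bytes": raw,
--     }
-- ===== Notes on version B (the rewrite author's own statement) =====
-- stated objective: alternative
-- what changed: Instead of four separate aggregation passes over the samples, B projects each sample to a per-sample 4-vector (count, drift flag, feature bytes, raw bytes), transposes with zip(*vecs) and sums each column.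
import Mathlib
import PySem

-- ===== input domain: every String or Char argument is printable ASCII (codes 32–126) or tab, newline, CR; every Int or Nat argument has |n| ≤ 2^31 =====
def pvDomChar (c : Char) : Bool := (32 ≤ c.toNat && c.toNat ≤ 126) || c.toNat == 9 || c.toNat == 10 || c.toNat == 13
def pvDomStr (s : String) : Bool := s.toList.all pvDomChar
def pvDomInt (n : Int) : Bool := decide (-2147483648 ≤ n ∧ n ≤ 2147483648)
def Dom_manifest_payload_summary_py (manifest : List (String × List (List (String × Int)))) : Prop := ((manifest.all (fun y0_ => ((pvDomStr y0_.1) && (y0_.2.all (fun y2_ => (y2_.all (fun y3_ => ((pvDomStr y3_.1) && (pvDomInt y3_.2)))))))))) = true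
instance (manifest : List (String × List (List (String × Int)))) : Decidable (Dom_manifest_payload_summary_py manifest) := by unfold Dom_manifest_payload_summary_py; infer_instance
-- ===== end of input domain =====

-- B replaces A's four separate aggregation passes with a map of each sample to a
-- 4-vector of its contributions, a transpose, and columnwise sums (alternative decomposition).

-- `manifest.get("samples") or []` : a missing key or an empty (falsy) list both give []
def pvSamplesOf (manifest : List (String × List (List (String × Int)))) : List (List (String × Int)) :=
  match manifest.lookup "samples" with
  | none => []
  | some v => if v = [] then [] else v   -- Python truthiness of a list

-- ===== PORT A =====
-- Four passes: len, then three generator-expression sums.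
-- Python coercions on ints: `bool(x)` = (x ≠ 0), `int(x or 0)` = x.
def manifest_payload_summary_py (manifest : List (String × List (List (String × Int)))) : List (String × Int) :=
  let samples := pvSamplesOf manifest
  [("samples", (samples.length : Int)),
   ("drift_window_samples",
     ((samples.filter (fun s => (s.lookup "in_drift_window").getD 0 ≠ 0)).map
       (fun _ => (1 : Int))).sum),
   ("feature_bytes", (samples.map (fun s => (s.lookup "feature_bytes").getD 0)).sum),
   ("raw_bytes", (samples.map (fun s => (s.lookup "raw_bytes").getD 0)).sum)]

-- ===== PORT B =====
-- stats(sample): the per-sample contribution vector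
def pvStats (s : List (String × Int)) : Int × Int × Int × Int :=
  (1,
   if (s.lookup "in_drift_window").getD 0 ≠ 0 then 1 else 0,
   (s.lookup "feature_bytes").getD 0,
   (s.lookup "raw_bytes").getD 0)

def manifest_payload_summary_py_alt (manifest : List (String × List (List (String × Int)))) : List (String × Int) :=
  let vecs := (pvSamplesOf manifest).map pvStats
  -- `map(sum, zip(*vecs)) if vecs else (0,0,0,0)`: the columns of the transpose are the
  -- four component projections of vecs, each summed
  let totals : Int × Int × Int × Int :=
    if vecs = [] then (0, 0, 0, 0)
    else ((vecs.map (·.1)).sum, (vecs.map (·.2.1)).sum,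
          (vecs.map (·.2.2.1)).sum, (vecs.map (·.2.2.2)).sum)
  [("samples", totals.1),
   ("drift_window_samples", totals.2.1),
   ("feature_bytes", totals.2.2.1),
   ("raw_bytes", totals.2.2.2)]

-- ===== PRECONDITION & SPEC =====
def Spec_manifest_payload_summary_py (manifest : List (String × List (List (String × Int)))) (out : List (String × Int)) : Prop := out = manifest_payload_summary_py_alt manifest
instance (manifest : List (String × List (List (String × Int)))) (out : List (String × Int)) : Decidable (Spec_manifest_payload_summary_py manifest out) := by unfold Spec_manifest_payload_summary_py; infer_instance

-- ===== CLAIM (what is proved, stated in full; the proofs are below) =====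
def Claim_equal_manifest_payload_summary_py : Prop := ∀ (manifest : List (String × List (List (String × Int)))), Dom_manifest_payload_summary_py manifest → Spec_manifest_payload_summary_py manifest (manifest_payload_summary_py manifest)

-- ===== LEMMAS AND PROOFS =====
lemma pvSum_ones_eq_filter (xs : List (List (String × Int))) (p : List (String × Int) → Prop)
    [DecidablePred p] :
    (xs.map (fun s => if p s then (1 : Int) else 0)).sum =
      ((xs.filter (fun s => p s)).map (fun _ => (1 : Int))).sum := by
  induction xs with
  | nil => simp
  | cons x xs ih =>
    by_cases h : p x <;> simp [h, ih]

lemma pvSum_count (xs : List (List (String × Int))) :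
    (xs.map (fun s => (pvStats s).1)).sum = (xs.length : Int) := by
  simp [pvStats]

-- ===== VERDICT (by name: the statement is the Claim_ definition above) =====
theorem manifest_payload_summary_py_spec : Claim_equal_manifest_payload_summary_py := by
  intro manifest _
  unfold Spec_manifest_payload_summary_py manifest_payload_summary_py manifest_payload_summary_py_alt
  rcases h : pvSamplesOf manifest with _ | ⟨x, xs⟩
  · simp
  · simp only [List.map_cons, List.cons.injEq, List.map_map, Function.comp_def]
    have hcnt := pvSum_count (x :: xs)
    have hdr := pvSum_ones_eq_filter (x :: xs)
      (fun s => (s.lookup "in_drift_window").getD 0 ≠ 0)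
    simp [pvStats] at hcnt hdr ⊢
    refine ⟨?_, ?_⟩
    · omega
    · simpa using hdr.symm
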